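-- pv_equiv track=rewrite | github.com/pablohonney/hidalgos | src/strings/search/rabin_karp.py | rabin_roller
-- ===== SOURCE A (Python) =====
-- BASE = 101  # primes are favoured
--
-- def _rabin_fingerprint(plain_text, start, end):
--     code = 0
--
--     for degree in range(end - start):
--         char = plain_text[start + degree]
--         code += ord(char) * (BASE ** degree)
--     return code
--
-- def rabin_roller(plain_text, window):  # rewrite as a class to access the pointer info.
--     code = _rabin_fingerprint(plain_text, 0, window)
--
--     yield code
--     for i in range(len(plain_text) - window):
--         tail = plain_text[i]
--         head = plain_text[window + i]
--
--         code -= ord(tail)  # cut off the rail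
--         code //= BASE  # shift the code
--         code += ord(head) * (BASE ** (window - 1))  # add the new head
--         yield code
-- ===== SOURCE B (Python) =====
-- BASE = 101  # primes are favoured
--
-- def _rabin_fingerprint(plain_text, start, end):
--     code = 0
--     for degree in range(end - start):
--         code += ord(plain_text[start + degree]) * (BASE ** degree)
--     return code
--
-- def rabin_roller(plain_text, window):
--     # Recompute each window's fingerprint directly instead of rolling updates.
--     yield _rabin_fingerprint(plain_text, 0, window)
--     for i in range(1, len(plain_text) - window + 1):
--         yield _rabin_fingerprint(plain_text, i, i + window)
-- ===== Notes on version B (the rewrite author's own statement) =====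
-- stated objective: simpler
-- what changed: Replaces the incremental subtract/floor-divide/add rolling update with an independent direct recomputation of each window's fingerprint via the existing _rabin_fingerprint helper.
-- outside the precondition, e.g. on rabin_roller('ab', 0): A returns [0, -0.03960396039603964, -0.02970297029702973], B returns [0, 0, 0]
import Mathlib
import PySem

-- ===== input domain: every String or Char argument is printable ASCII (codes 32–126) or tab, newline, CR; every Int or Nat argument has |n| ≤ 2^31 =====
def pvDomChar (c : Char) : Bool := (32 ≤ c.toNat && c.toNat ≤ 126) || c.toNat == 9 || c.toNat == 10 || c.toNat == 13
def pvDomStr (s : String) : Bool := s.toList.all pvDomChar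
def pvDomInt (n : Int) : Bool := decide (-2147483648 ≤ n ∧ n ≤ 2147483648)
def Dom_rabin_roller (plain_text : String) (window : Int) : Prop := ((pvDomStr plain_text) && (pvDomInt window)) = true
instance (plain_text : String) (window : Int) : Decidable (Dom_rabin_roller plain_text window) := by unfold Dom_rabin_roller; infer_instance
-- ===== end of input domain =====

-- B replaces A's incremental rolling-hash update by a direct per-window recomputation of each
-- fingerprint (simpler, no rolling arithmetic); same values on all admitted inputs.


-- ===== PORT A =====
-- _rabin_fingerprint, transliterated (plain_text as List Char; indexing via pyGetD, in range under Pre_)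
def pvFingerA (s : List Char) (start fin : Int) : Int :=
  (PySem.List.pyRange 0 (fin - start) 1).foldl
    (fun code degree =>
      code + ((PySem.List.pyGetD s (start + degree) ' ').toNat : Int) * 101 ^ degree.toNat)
    0

def rabin_roller (plain_text : String) (window : Int) : List Int :=
  let s := plain_text.toList
  let code := pvFingerA s 0 window
  let r := (PySem.List.pyRange 0 ((s.length : Int) - window) 1).foldl
    (fun (acc : List Int × Int) i =>
      let tail := ((PySem.List.pyGetD s i ' ').toNat : Int)
      let head := ((PySem.List.pyGetD s (window + i) ' ').toNat : Int)
      let c := PySem.Int.floordiv (acc.2 - tail) 101 + head * 101 ^ (window - 1).toNat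
      (acc.1 ++ [c], c))
    ([code], code)
  r.1

-- ===== PORT B =====
-- Source B's _rabin_fingerprint (same helper, B-side copy)
def pvFingerB (s : List Char) (start fin : Int) : Int :=
  (PySem.List.pyRange 0 (fin - start) 1).foldl
    (fun code degree =>
      code + ((PySem.List.pyGetD s (start + degree) ' ').toNat : Int) * 101 ^ degree.toNat)
    0

def rabin_roller_alt (plain_text : String) (window : Int) : List Int :=
  let s := plain_text.toList
  pvFingerB s 0 window ::
    (PySem.List.pyRange 1 ((s.length : Int) - window + 1) 1).map
      (fun i => pvFingerB s i (i + window))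

-- ===== PRECONDITION & SPEC =====
-- Pre_ excludes window < 0 and window > len (A's generator raises IndexError) and window = 0 on a
-- nonempty string, where A yields floats (BASE ** (window - 1) = 101 ** -1), not ints.
def Pre_rabin_roller (plain_text : String) (window : Int) : Prop :=
  (1 ≤ window ∧ window ≤ (plain_text.toList.length : Int)) ∨ (window = 0 ∧ plain_text = "")
instance (plain_text : String) (window : Int) : Decidable (Pre_rabin_roller plain_text window) := by
  unfold Pre_rabin_roller; infer_instance
def pvWitness_rabin_roller : String × Int := ("abcde", 2)

def Spec_rabin_roller (plain_text : String) (window : Int) (out : List Int) : Prop := out = rabin_roller_alt plain_text window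
instance (plain_text : String) (window : Int) (out : List Int) : Decidable (Spec_rabin_roller plain_text window out) := by unfold Spec_rabin_roller; infer_instance

-- ===== CLAIM (what is proved, stated in full; the proofs are below) =====
def Claim_equal_rabin_roller : Prop := ∀ (plain_text : String) (window : Int), Dom_rabin_roller plain_text window → Pre_rabin_roller plain_text window → Spec_rabin_roller plain_text window (rabin_roller plain_text window)

-- ===== LEMMAS AND PROOFS =====

-- proof-side fingerprint, head-first Horner form
def pvG (s : List Char) (i : Nat) : Nat → Int
  | 0 => 0
  | w + 1 => ((s.getD i ' ').toNat : Int) + 101 * pvG s (i + 1) w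

lemma pvG_snoc (s : List Char) : ∀ (w i : Nat),
    pvG s i (w + 1) = pvG s i w + ((s.getD (i + w) ' ').toNat : Int) * 101 ^ w := by
  intro w
  induction w with
  | zero => intro i; simp [pvG]
  | succ m ih =>
      intro i
      rw [pvG, ih (i + 1), show i + 1 + m = i + (m + 1) by omega, pvG]
      ring

-- A's/B's fingerprint helper equals pvG (both have the same body)
lemma finger_eq_pvG (s : List Char) : ∀ (m i : Nat),
    pvFingerA s (i : Int) ((i : Int) + (m : Int)) = pvG s i m := by
  intro m i
  unfold pvFingerA
  rw [PySem.List.foldl_add]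
  rw [show ((i : Int) + (m : Int) - (i : Int)) = (m : Int) by ring]
  rw [PySem.List.pyRange_zero_natCast]
  induction m with
  | zero => simp [pvG]
  | succ k ih =>
      rw [List.range_succ, List.map_append, List.map_append, List.sum_append, pvG_snoc]
      simp only [List.map_cons, List.map_nil, List.sum_cons, List.sum_nil]
      rw [← ih]
      have : PySem.List.pyGetD s ((i : Int) + (k : Int)) ' ' = s.getD (i + k) ' ' := by
        rw [show ((i : Int) + (k : Int)) = ((i + k : Nat) : Int) by push_cast; ring,
            PySem.List.pyGetD_natCast]
      rw [this, Int.toNat_natCast]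
      ring

lemma fingerB_eq_pvG (s : List Char) (m i : Nat) :
    pvFingerB s (i : Int) ((i : Int) + (m : Int)) = pvG s i m := by
  rw [show pvFingerB = pvFingerA from rfl]; exact finger_eq_pvG s m i

-- the rolling update of A advances the fingerprint by one position
lemma roll_step (s : List Char) (i m : Nat) :
    PySem.Int.floordiv (pvG s i (m + 1) - ((s.getD i ' ').toNat : Int)) 101
      + ((s.getD (i + (m + 1)) ' ').toNat : Int) * 101 ^ m = pvG s (i + 1) (m + 1) := by
  rw [pvG]
  rw [show (((s.getD i ' ').toNat : Int) + 101 * pvG s (i + 1) m - ((s.getD i ' ').toNat : Int))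
        = 101 * pvG s (i + 1) m by ring]
  rw [PySem.Int.floordiv_eq_ediv_of_pos (by norm_num), Int.mul_ediv_cancel_left _ (by norm_num)]
  rw [pvG_snoc]
  rw [show i + (m + 1) = i + 1 + m by omega]

-- proof-side name for A's zeta-reduced loop body
def pvStep (s : List Char) (w : Int) (acc : List Int × Int) (j : Int) : List Int × Int :=
  (acc.1 ++ [PySem.Int.floordiv (acc.2 - ((PySem.List.pyGetD s j ' ').toNat : Int)) 101
      + ((PySem.List.pyGetD s (w + j) ' ').toNat : Int) * 101 ^ (w - 1).toNat],
   PySem.Int.floordiv (acc.2 - ((PySem.List.pyGetD s j ' ').toNat : Int)) 101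
      + ((PySem.List.pyGetD s (w + j) ' ').toNat : Int) * 101 ^ (w - 1).toNat)

lemma pvStep_adv (s : List Char) (m i : Nat) (pref : List Int) :
    pvStep s ((m + 1 : Nat) : Int) (pref, pvG s i (m + 1)) ((i : Nat) : Int)
      = (pref ++ [pvG s (i + 1) (m + 1)], pvG s (i + 1) (m + 1)) := by
  unfold pvStep
  rw [show (((m + 1 : Nat) : Int) + (i : Int)) = ((m + 1 + i : Nat) : Int) by push_cast; ring,
      PySem.List.pyGetD_natCast, PySem.List.pyGetD_natCast,
      show ((((m + 1 : Nat) : Int)) - 1).toNat = m by omega,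
      show (m + 1 + i : Nat) = i + (m + 1) by omega, roll_step]

lemma loopA (s : List Char) (w : Nat) (hw : 1 ≤ w) :
    ∀ (k i : Nat) (pref : List Int), i + k = s.length - w → w ≤ s.length →
    (PySem.List.pyRange (i : Int) ((s.length - w : Nat) : Int) 1).foldl
      (pvStep s (w : Int)) (pref, pvG s i w)
    = (pref ++ (List.range k).map (fun j => pvG s (i + 1 + j) w), pvG s (s.length - w) w) := by
  intro k
  induction k with
  | zero =>
      intro i pref hik _
      rw [PySem.List.pyRange_one_eq_nil (by omega), show i = s.length - w from by omega]
      simp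
  | succ k ih =>
      intro i pref hik hwn
      obtain ⟨m, rfl⟩ : ∃ m, w = m + 1 := ⟨w - 1, by omega⟩
      rw [PySem.List.pyRange_one_cons (by omega), List.foldl_cons, pvStep_adv,
          show ((i : Int) + 1) = ((i + 1 : Nat) : Int) by push_cast; ring,
          ih (i + 1) (pref ++ [pvG s (i + 1) (m + 1)]) (by omega) hwn]
      rw [List.range_succ_eq_map, List.map_cons, List.map_map]
      simp only [List.append_assoc, List.singleton_append, Function.comp_def, Prod.mk.injEq]
      refine ⟨?_, trivial⟩
      rw [show i + 1 + 0 = i + 1 by omega]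
      congr 1
      congr 1
      apply List.map_congr_left
      intro j _
      congr 1
      omega

lemma portA_eq (pt : String) (wn : Nat) (hw : 1 ≤ wn) (hn : wn ≤ pt.toList.length) :
    rabin_roller pt (wn : Int)
      = pvG pt.toList 0 wn
        :: (List.range (pt.toList.length - wn)).map (fun j => pvG pt.toList (1 + j) wn) := by
  unfold rabin_roller
  have hfun : (fun (acc : List Int × Int) i =>
      let tail := ((PySem.List.pyGetD pt.toList i ' ').toNat : Int)
      let head := ((PySem.List.pyGetD pt.toList (((wn : Nat) : Int) + i) ' ').toNat : Int)
      let c := PySem.Int.floordiv (acc.2 - tail) 101 + head * 101 ^ (((wn : Nat) : Int) - 1).toNat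
      (acc.1 ++ [c], c)) = pvStep pt.toList ((wn : Nat) : Int) := by
    funext acc i; rfl
  have hcode : pvFingerA pt.toList 0 ((wn : Nat) : Int) = pvG pt.toList 0 wn := by
    have h := finger_eq_pvG pt.toList wn 0
    simpa using h
  simp only [hfun, hcode]
  rw [show ((pt.toList.length : Int) - ((wn : Nat) : Int))
        = ((pt.toList.length - wn : Nat) : Int) by omega,
      show (0 : Int) = ((0 : Nat) : Int) from rfl,
      loopA pt.toList wn hw (pt.toList.length - wn) 0 [pvG pt.toList 0 wn] (by omega) hn]
  simp

lemma portB_eq (pt : String) (wn : Nat) (hn : wn ≤ pt.toList.length) :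
    rabin_roller_alt pt (wn : Int)
      = pvG pt.toList 0 wn
        :: (List.range (pt.toList.length - wn)).map (fun j => pvG pt.toList (1 + j) wn) := by
  unfold rabin_roller_alt
  have hcode : pvFingerB pt.toList 0 ((wn : Nat) : Int) = pvG pt.toList 0 wn := by
    have h := fingerB_eq_pvG pt.toList wn 0
    simpa using h
  simp only [hcode]
  rw [PySem.List.pyRange_one,
      show (((pt.toList.length : Int) - ((wn : Nat) : Int) + 1) - 1).toNat
        = pt.toList.length - wn by omega,
      List.map_map]
  congr 1
  apply List.map_congr_left
  intro k _
  have h := fingerB_eq_pvG pt.toList wn (1 + k)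
  rw [Function.comp_apply,
      show ((1 : Int) + (k : Int)) = ((1 + k : Nat) : Int) by push_cast; ring, ← h]

-- ===== VERDICT (by name: the statement is the Claim_ definition above) =====
theorem rabin_roller_spec : Claim_equal_rabin_roller := by
  intro pt w _ hpre
  unfold Spec_rabin_roller
  rcases hpre with ⟨h1, h2⟩ | ⟨rfl, rfl⟩
  · obtain ⟨wn, rfl⟩ : ∃ wn : Nat, w = (wn : Int) := ⟨w.toNat, by omega⟩
    rw [portA_eq pt wn (by exact_mod_cast h1) (by exact_mod_cast h2),
        portB_eq pt wn (by exact_mod_cast h2)]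
  · rfl
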